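-- pv_equiv track=rewrite | github.com/burning-calamity/extirpation | online/gronsfeld.py | gronsfeld_decrypt
-- ===== SOURCE A (Python) =====
-- def _digits(key: str) -> list[int]:
--     digs = [int(c) for c in key if c.isdigit()]
--     if not digs:
--         raise ValueError("key must contain at least one digit")
--     return digs
--
-- def gronsfeld_decrypt(ciphertext: str, key: str) -> str:
--     ks = _digits(key)
--     out = []
--     j = 0
--     for ch in ciphertext:
--         if ch.isalpha():
--             base = ord("A") if ch.isupper() else ord("a")
--             c = ord(ch) - base
--             out.append(chr(base + ((c - ks[j % len(ks)]) % 26)))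
--             j += 1
--         else:
--             out.append(ch)
--     return "".join(out)
-- ===== SOURCE B (Python) =====
-- from itertools import cycle
--
-- def _digits(key: str) -> list[int]:
--     digs = [int(c) for c in key if c.isdigit()]
--     if not digs:
--         raise ValueError("key must contain at least one digit")
--     return digs
--
-- def gronsfeld_decrypt(ciphertext: str, key: str) -> str:
--     ks = _digits(key)
--     letters = [ch for ch in ciphertext if ch.isalpha()]
--     dec = (chr((ord("A") if ch.isupper() else ord("a"))
--                + ((ord(ch) - (ord("A") if ch.isupper() else ord("a")) - k) % 26))
--            for ch, k in zip(letters, cycle(ks)))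
--     return "".join(next(dec) if ch.isalpha() else ch for ch in ciphertext)
-- ===== Notes on version B (the rewrite author's own statement) =====
-- stated objective: alternative
-- what changed: Replaced A's single indexed pass with a per-letter key counter by two phases: decrypt the alphabetic characters zipped against itertools.cycle of the key digits, then re-interleave the decrypted stream with the non-letters of the original text.
import Mathlib
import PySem

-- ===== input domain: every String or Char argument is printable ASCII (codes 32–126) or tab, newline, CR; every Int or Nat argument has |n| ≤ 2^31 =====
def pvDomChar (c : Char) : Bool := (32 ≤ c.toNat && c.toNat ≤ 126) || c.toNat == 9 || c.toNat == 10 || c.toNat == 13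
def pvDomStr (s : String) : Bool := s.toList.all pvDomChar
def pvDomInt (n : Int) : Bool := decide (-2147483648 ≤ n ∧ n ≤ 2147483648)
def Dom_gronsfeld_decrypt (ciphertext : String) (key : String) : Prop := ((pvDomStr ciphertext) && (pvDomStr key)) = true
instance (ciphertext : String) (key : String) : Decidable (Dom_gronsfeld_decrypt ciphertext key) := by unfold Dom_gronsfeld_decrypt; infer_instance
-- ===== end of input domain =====

-- B re-implements the decryption as two phases (decrypt the letters zipped against the
-- cycled key, then re-interleave with the non-letters) instead of A's single indexed pass;
-- equivalence is proved on keys containing at least one digit (otherwise A raises ValueError).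

-- ===== PORT A =====
-- _digits: [int(c) for c in key if c.isdigit()]; int(c) on an ASCII digit char is c.toNat - 48 (exact on Dom)
def pvDigitsA (key : String) : List Int :=
  (key.toList.filter PySem.Chars.isdigit).map (fun c => (c.toNat : Int) - 48)

-- body of A's for-loop: state is (out, j)
def pvStepA (ks : List Int) (st : List Char × Nat) (ch : Char) : List Char × Nat :=
  if PySem.Chars.isalpha ch then
    let base : Int := if PySem.Chars.isupper ch then 65 else 97
    let c : Int := (ch.toNat : Int) - base
    -- ks[j % len(ks)]: the index is always in range, so getD is exact
    let k : Int := ks.getD (st.2 % ks.length) 0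
    (st.1 ++ [Char.ofNat (base + PySem.Int.mod (c - k) 26).toNat], st.2 + 1)
  else
    (st.1 ++ [ch], st.2)

def gronsfeld_decrypt (ciphertext : String) (key : String) : String :=
  let ks := pvDigitsA key
  if ks = [] then ""   -- Python: raise ValueError (excluded by Pre_)
  else String.ofList (ciphertext.toList.foldl (pvStepA ks) ([], 0)).1

-- ===== PORT B =====
def pvDigitsB (key : String) : List Int :=
  (key.toList.filter PySem.Chars.isdigit).map (fun c => (c.toNat : Int) - 48)

-- decrypt one letter with key digit k
def pvDecB (k : Int) (ch : Char) : Char :=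
  let base : Int := if PySem.Chars.isupper ch then 65 else 97
  Char.ofNat (base + PySem.Int.mod (((ch.toNat : Int) - base) - k) 26).toNat

-- zip(letters, cycle(ks)): the key digit paired with the i-th letter is ks[i % len(ks)]
def pvDecLetters (ks : List Int) (letters : List Char) : List Char :=
  (letters.zipIdx).map (fun p => pvDecB (ks.getD (p.2 % ks.length) 0) p.1)

-- ''.join(next(dec) if ch.isalpha() else ch for ch in ciphertext)
def pvReinterleave : List Char → List Char → List Char
  | [], _ => []
  | ch :: rest, ds =>
    if PySem.Chars.isalpha ch then
      match ds with
      | d :: ds' => d :: pvReinterleave rest ds'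
      | [] => pvReinterleave rest []
    else ch :: pvReinterleave rest ds

def gronsfeld_decrypt_alt (ciphertext : String) (key : String) : String :=
  let ks := pvDigitsB key
  if ks = [] then ""   -- Python: raise ValueError (excluded by Pre_)
  else
    let letters := ciphertext.toList.filter PySem.Chars.isalpha
    String.ofList (pvReinterleave ciphertext.toList (pvDecLetters ks letters))

-- ===== PRECONDITION & SPEC =====
-- Pre_ excludes exactly the keys with no digit, on which A raises ValueError.
def Pre_gronsfeld_decrypt (_ciphertext : String) (key : String) : Prop :=
  key.toList.any PySem.Chars.isdigit = true
instance (ciphertext : String) (key : String) : Decidable (Pre_gronsfeld_decrypt ciphertext key) := by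
  unfold Pre_gronsfeld_decrypt; infer_instance
def pvWitness_gronsfeld_decrypt : String × String := ("Khoor, Zruog!", "31415")

def Spec_gronsfeld_decrypt (ciphertext : String) (key : String) (out : String) : Prop := out = gronsfeld_decrypt_alt ciphertext key
instance (ciphertext : String) (key : String) (out : String) : Decidable (Spec_gronsfeld_decrypt ciphertext key out) := by unfold Spec_gronsfeld_decrypt; infer_instance

-- ===== CLAIM (what is proved, stated in full; the proofs are below) =====
def Claim_equal_gronsfeld_decrypt : Prop := ∀ (ciphertext : String) (key : String), Dom_gronsfeld_decrypt ciphertext key → Pre_gronsfeld_decrypt ciphertext key → Spec_gronsfeld_decrypt ciphertext key (gronsfeld_decrypt ciphertext key)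

-- ===== LEMMAS AND PROOFS =====

-- B's zipIdx-map, with the index offset made explicit
def pvDecFrom (ks : List Int) (j : Nat) : List Char → List Char
  | [] => []
  | ch :: t => pvDecB (ks.getD (j % ks.length) 0) ch :: pvDecFrom ks (j + 1) t

theorem pvDecLetters_from (ks : List Int) (letters : List Char) (j : Nat) :
    (letters.zipIdx j).map (fun p => pvDecB (ks.getD (p.2 % ks.length) 0) p.1)
      = pvDecFrom ks j letters := by
  induction letters generalizing j with
  | nil => rfl
  | cons ch t ih => simpa [List.zipIdx, pvDecFrom] using ih (j + 1)

theorem pvLoop_eq (ks : List Int) (cs : List Char) (acc : List Char) (j : Nat) :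
    (cs.foldl (pvStepA ks) (acc, j)).1
      = acc ++ pvReinterleave cs (pvDecFrom ks j (cs.filter PySem.Chars.isalpha)) := by
  induction cs generalizing acc j with
  | nil => simp [pvReinterleave]
  | cons ch rest ih =>
    by_cases h : PySem.Chars.isalpha ch = true
    · simp only [List.foldl_cons, pvStepA, h, if_pos, List.filter_cons_of_pos h, pvDecFrom,
        pvReinterleave, pvDecB]
      rw [ih]
      simp
    · simp only [List.foldl_cons, pvStepA, h, List.filter_cons_of_neg h,
        pvReinterleave]
      rw [ih]
      simp

-- ===== VERDICT (by name: the statement is the Claim_ definition above) =====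
theorem gronsfeld_decrypt_spec : Claim_equal_gronsfeld_decrypt := by
  intro ciphertext key _ hpre
  unfold Spec_gronsfeld_decrypt gronsfeld_decrypt gronsfeld_decrypt_alt pvDigitsA pvDigitsB
  have hne : (key.toList.filter PySem.Chars.isdigit).map (fun c => (c.toNat : Int) - 48) ≠ [] := by
    simp only [ne_eq, List.map_eq_nil_iff, List.filter_eq_nil_iff]
    unfold Pre_gronsfeld_decrypt at hpre
    simp only [List.any_eq_true] at hpre
    obtain ⟨c, hc, hd⟩ := hpre
    intro h; exact absurd hd (by simpa using h c hc)
  rw [if_neg hne, if_neg hne]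
  rw [pvLoop_eq]
  simp only [pvDecLetters, pvDecLetters_from, List.nil_append]
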